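-- pv_equiv track=rewrite | github.com/lenarother/advent-of-code | adventofcode_2018/day_02/solution.py | compare_ids
-- ===== SOURCE A (Python) =====
-- def compare_ids(id, id_other):
--     result_id = ''
--     counter = 0
--     for ch, ch_other in zip(id, id_other):
--         if ch == ch_other:
--             result_id += ch
--         else:
--             counter += 1
--             if counter > 1:
--                 return
--     return result_id
-- ===== SOURCE B (Python) =====
-- def compare_ids(id, id_other):
--     n = min(len(id), len(id_other))
--     a, b = id[:n], id_other[:n]
--     i = 0
--     while i < n and a[i] == b[i]:
--         i += 1
--     if i == n:
--         return a
--     if a[i + 1:] != b[i + 1:]: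
--         return
--     return a[:i] + a[i + 1:]
-- ===== Notes on version B (the rewrite author's own statement) =====
-- stated objective: alternative
-- what changed: Instead of A's char-by-char loop with a mismatch counter and a growing result accumulator, B locates the first mismatch by a common-prefix scan, decides the >1-mismatch case by one whole-string equality test of the suffixes after that position, and builds the result by slice splicing (prefix + suffix).
import Mathlib
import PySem

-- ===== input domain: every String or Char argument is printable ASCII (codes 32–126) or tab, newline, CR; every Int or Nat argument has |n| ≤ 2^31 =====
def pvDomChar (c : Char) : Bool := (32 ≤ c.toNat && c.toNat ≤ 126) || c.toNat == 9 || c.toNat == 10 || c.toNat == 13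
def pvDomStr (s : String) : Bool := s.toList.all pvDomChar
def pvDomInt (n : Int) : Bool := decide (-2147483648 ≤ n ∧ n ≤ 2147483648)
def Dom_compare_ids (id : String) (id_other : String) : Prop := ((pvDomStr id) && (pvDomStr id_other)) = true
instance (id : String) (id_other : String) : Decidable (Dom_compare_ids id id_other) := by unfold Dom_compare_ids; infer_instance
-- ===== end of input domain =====

-- B replaces A's interleaved count-and-accumulate loop by: common-prefix scan to the first
-- mismatch, one whole-suffix equality test, and slice splicing (objective: alternative).


-- ===== PORT A =====
-- loop over zip(id, id_other) carrying result_id and counter, early `return` (none) when counter > 1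
def compareIdsGo : List (Char × Char) → List Char → Nat → Option String
  | [], acc, _ => some (String.mk acc)
  | (ch, ch_other) :: rest, acc, counter =>
      if ch == ch_other then
        compareIdsGo rest (acc ++ [ch]) counter
      else
        if counter + 1 > 1 then none
        else compareIdsGo rest acc (counter + 1)

def compare_ids (id : String) (id_other : String) : Option String :=
  compareIdsGo (id.toList.zip id_other.toList) [] 0

-- ===== PORT B =====
-- the `while i < n and a[i] == b[i]` scan: length of the common prefix
def cpLen : List Char → List Char → Nat
  | x :: xs, y :: ys => if x == y then cpLen xs ys + 1 else 0
  | _, _ => 0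

def compare_ids_alt (id : String) (id_other : String) : Option String :=
  let n := min id.toList.length id_other.toList.length
  let a := id.toList.take n
  let b := id_other.toList.take n
  let i := cpLen a b
  if i = n then some (String.mk a)
  else if a.drop (i + 1) = b.drop (i + 1) then some (String.mk (a.take i ++ a.drop (i + 1)))
  else none

-- ===== PRECONDITION & SPEC =====
def Spec_compare_ids (id : String) (id_other : String) (out : Option String) : Prop := out = compare_ids_alt id id_other
instance (id : String) (id_other : String) (out : Option String) : Decidable (Spec_compare_ids id id_other out) := by unfold Spec_compare_ids; infer_instance

-- ===== CLAIM (what is proved, stated in full; the proofs are below) =====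
def Claim_equal_compare_ids : Prop := ∀ (id : String) (id_other : String), Dom_compare_ids id id_other → Spec_compare_ids id id_other (compare_ids id id_other)

-- ===== LEMMAS AND PROOFS =====

theorem compareIdsGo_eq (l : List (Char × Char)) :
    ∀ (acc : List Char) (c : Nat), c ≤ 1 →
    compareIdsGo l acc c =
      if (l.filter (fun p => !(p.1 == p.2))).length + c > 1 then none
      else some (String.mk (acc ++ (l.filter (fun p => p.1 == p.2)).map Prod.fst)) := by
  induction l with
  | nil =>
      intro acc c hc
      simp [compareIdsGo]
      omega
  | cons hd tl ih =>
      intro acc c hc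
      obtain ⟨ch, ch_other⟩ := hd
      by_cases h : ch == ch_other
      · simp [compareIdsGo, h, ih (acc ++ [ch]) c hc]
      · simp only [compareIdsGo]
        rw [if_neg h]
        by_cases hcz : c = 0
        · subst hcz
          rw [ih acc 1 (by omega)]
          simp only [List.filter_cons, h, Bool.not_false, if_true, List.length_cons]
          split_ifs with h1 h2 h2 <;> first | rfl | omega | (exfalso; omega)
        · have hc1 : c = 1 := by omega
          subst hc1
          simp [h]

-- for equal-length lists, no mismatching zipped pair ↔ the lists are equal
theorem zip_no_mismatch_iff (a : List Char) :
    ∀ b : List Char, a.length = b.length →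
    ((((a.zip b).filter (fun p => !(p.1 == p.2))).length = 0) ↔ a = b) := by
  induction a with
  | nil => intro b hb; cases b <;> simp_all
  | cons x xs ih =>
      intro b hb
      cases b with
      | nil => simp at hb
      | cons y ys =>
          simp only [List.length_cons, Nat.succ.injEq] at hb
          by_cases h : x == y
          · have hx : x = y := by simpa using h
            simp [List.zip_cons_cons, ih ys hb, hx]
          · have hx : x ≠ y := by simpa using h
            simp [List.zip_cons_cons, h, hx]

theorem zip_self_matches (a : List Char) :
    ((a.zip a).filter (fun p => p.1 == p.2)).map Prod.fst = a := by
  induction a with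
  | nil => simp
  | cons x xs ih => simp [List.zip_cons_cons, ih]

-- proof-side cores over lists (the ports are unchanged above)
def aCore (a b : List Char) : Option (List Char) :=
  if ((a.zip b).filter (fun p => !(p.1 == p.2))).length > 1 then none
  else some (((a.zip b).filter (fun p => p.1 == p.2)).map Prod.fst)

def bCore (a b : List Char) : Option (List Char) :=
  let i := cpLen a b
  if i = a.length then some a
  else if a.drop (i + 1) = b.drop (i + 1) then some (a.take i ++ a.drop (i + 1))
  else none

theorem core_eq (a : List Char) :
    ∀ b : List Char, a.length = b.length → aCore a b = bCore a b := by
  induction a with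
  | nil => intro b hb; cases b <;> simp_all [aCore, bCore, cpLen]
  | cons x xs ih =>
      intro b hb
      cases b with
      | nil => simp at hb
      | cons y ys =>
          simp only [List.length_cons, Nat.succ.injEq] at hb
          by_cases h : x == y
          · have hx : x = y := by simpa using h
            have hA : aCore (x :: xs) (y :: ys) = (aCore xs ys).map (fun l => x :: l) := by
              simp only [aCore, List.zip_cons_cons, List.filter_cons, h, Bool.not_true,
                Bool.false_eq_true, if_false, if_true, List.map_cons]
              split_ifs <;> simp
            have hB : bCore (x :: xs) (y :: ys) = (bCore xs ys).map (fun l => x :: l) := by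
              simp only [bCore, cpLen, h, if_true, List.length_cons, Nat.add_right_cancel_iff,
                List.drop_succ_cons, List.take_succ_cons]
              split_ifs <;> simp
            rw [hA, hB, ih ys hb]
          · have hx : x ≠ y := by simpa using h
            have hi0 : cpLen (x :: xs) (y :: ys) = 0 := by simp [cpLen, h]
            simp only [aCore, bCore, hi0, List.zip_cons_cons, List.filter_cons, h,
              Bool.not_false, if_true, List.length_cons, List.drop_succ_cons, List.drop_zero,
              List.take_zero, List.nil_append]
            have hz : ¬ ((0 : Nat) = xs.length + 1) := by omega
            rw [if_neg hz]
            by_cases heq : xs = ys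
            · subst heq
              have hm : ((xs.zip xs).filter (fun p => !(p.1 == p.2))).length = 0 :=
                (zip_no_mismatch_iff xs xs rfl).mpr rfl
              simp [hm, zip_self_matches]
            · have hm : ((xs.zip ys).filter (fun p => !(p.1 == p.2))).length ≠ 0 := by
                intro h0; exact heq ((zip_no_mismatch_iff xs ys hb).mp h0)
              have hgt : ((xs.zip ys).filter (fun p => !(p.1 == p.2))).length + 1 > 1 := by omega
              simp [hgt, heq]

theorem ifform_eq_aCore (a b : List Char) :
    (if ((a.zip b).filter (fun p => !(p.1 == p.2))).length + 0 > 1 then none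
     else some (String.mk ([] ++ ((a.zip b).filter (fun p => p.1 == p.2)).map Prod.fst)))
    = (aCore a b).map String.mk := by
  simp only [aCore, Nat.add_zero, List.nil_append]
  split_ifs <;> simp

theorem alt_eq_bCore (id : String) (id_other : String) :
    compare_ids_alt id id_other =
      (bCore (id.toList.take (min id.toList.length id_other.toList.length))
             (id_other.toList.take (min id.toList.length id_other.toList.length))).map String.mk := by
  unfold compare_ids_alt bCore
  have h : (id.toList.take (min id.toList.length id_other.toList.length)).length
      = min id.toList.length id_other.toList.length := by simp
  simp only [h]
  split_ifs <;> simp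

-- ===== VERDICT (by name: the statement is the Claim_ definition above) =====
theorem compare_ids_spec : Claim_equal_compare_ids := by
  intro id id_other _
  unfold Spec_compare_ids compare_ids
  rw [compareIdsGo_eq _ [] 0 (by omega), List.zip_eq_zip_take_min, ifform_eq_aCore,
    core_eq _ _ (by simp), alt_eq_bCore]
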